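-- pv_equiv track=rewrite | github.com/njonsson/dotfiles | resources/confluence2md/utils.py | strip_surrounding_blank_lines
-- ===== SOURCE A (Python) =====
-- def strip_surrounding_blank_lines(value: str) -> str:
--     lines = value.splitlines()
--     start = 0
--     while start < len(lines) and not lines[start].strip():
--         start += 1
--     end = len(lines) - 1
--     while end >= 0 and not lines[end].strip():
--         end -= 1
--     if start > end:
--         return ""
--     return "\n".join(lines[start : end + 1])
-- ===== SOURCE B (Python) =====
-- def strip_surrounding_blank_lines(value: str) -> str:
--     lines = value.splitlines()
--     idx = [i for i, l in enumerate(lines) if l.strip()]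
--     if not idx:
--         return ""
--     return "\n".join(lines[idx[0] : idx[-1] + 1])
-- ===== Notes on version B (the rewrite author's own statement) =====
-- stated objective: simpler
-- what changed: Replaces A's two opposed while-loops (scanning forward then backward for the first/last non-blank line) with a single forward pass that collects the indices of all non-blank lines and slices between the first and last collected index.
import Mathlib
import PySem

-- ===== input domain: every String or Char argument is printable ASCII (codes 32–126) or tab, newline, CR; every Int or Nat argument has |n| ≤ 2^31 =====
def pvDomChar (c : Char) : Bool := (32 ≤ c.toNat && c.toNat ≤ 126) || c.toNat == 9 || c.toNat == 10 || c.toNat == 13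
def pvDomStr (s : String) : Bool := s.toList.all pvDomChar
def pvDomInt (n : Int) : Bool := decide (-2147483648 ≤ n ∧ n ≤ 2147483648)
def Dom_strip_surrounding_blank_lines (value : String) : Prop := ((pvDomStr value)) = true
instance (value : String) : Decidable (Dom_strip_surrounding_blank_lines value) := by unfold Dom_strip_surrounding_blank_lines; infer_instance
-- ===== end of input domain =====

-- B replaces A's two opposed while-loops by one index-collecting pass plus a slice (objective: simpler).

-- ===== PORT A =====
-- 'while start < len(lines) and not lines[start].strip(): start += 1' (short-circuit: index read only when in range)
def pvAStartLoop (lines : List String) (start : Nat) : Nat :=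
  if h : start < lines.length then
    if PySem.Str.strip lines[start] == "" then pvAStartLoop lines (start + 1) else start
  else start
termination_by lines.length - start

-- 'while end >= 0 and not lines[end].strip(): end -= 1' (pyGetD's default is never read: 0 ≤ e < len(lines) whenever it is consulted)
def pvAEndLoop (lines : List String) (e : Int) : Int :=
  if h : 0 ≤ e ∧ PySem.Str.strip (PySem.List.pyGetD lines e "") == "" then pvAEndLoop lines (e - 1) else e
termination_by (e + 1).toNat
decreasing_by omega

def strip_surrounding_blank_lines (value : String) : String :=
  let lines := PySem.Str.splitlines value
  let start := pvAStartLoop lines 0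
  let e := pvAEndLoop lines ((lines.length : Int) - 1)
  if (start : Int) > e then ""
  else PySem.Str.join "\n" (PySem.List.slice lines (some (start : Int)) (some (e + 1)))

-- ===== PORT B =====
def strip_surrounding_blank_lines_alt (value : String) : String :=
  let lines := PySem.Str.splitlines value
  let idx := ((PySem.List.enumerate lines 0).filter (fun p => PySem.Str.strip p.2 != "")).map (·.1)
  match idx with
  | [] => ""
  | i :: rest =>
      PySem.Str.join "\n" (PySem.List.slice lines (some i) (some ((i :: rest).getLast (by simp) + 1)))

-- ===== PRECONDITION & SPEC =====
def Spec_strip_surrounding_blank_lines (value : String) (out : String) : Prop := out = strip_surrounding_blank_lines_alt value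
instance (value : String) (out : String) : Decidable (Spec_strip_surrounding_blank_lines value out) := by unfold Spec_strip_surrounding_blank_lines; infer_instance

-- ===== CLAIM (what is proved, stated in full; the proofs are below) =====
def Claim_equal_strip_surrounding_blank_lines : Prop := ∀ (value : String), Dom_strip_surrounding_blank_lines value → Spec_strip_surrounding_blank_lines value (strip_surrounding_blank_lines value)

-- ===== LEMMAS AND PROOFS =====

def pvBlank (l : String) : Bool := PySem.Str.strip l == ""

def pvIdx (xs : List String) (n : Int) : List Int :=
  ((PySem.List.enumerate xs n).filter (fun p => PySem.Str.strip p.2 != "")).map (·.1)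

lemma pvAStart_eq (xs : List String) (n : Nat) (hn : n ≤ xs.length) :
    pvAStartLoop xs n = n + ((xs.drop n).takeWhile pvBlank).length := by
  suffices H : ∀ k n, n ≤ xs.length → xs.length - n ≤ k →
      pvAStartLoop xs n = n + ((xs.drop n).takeWhile pvBlank).length from
    H (xs.length - n) n hn le_rfl
  intro k
  induction k with
  | zero =>
    intro n hn hk
    have : n = xs.length := by omega
    subst this
    rw [pvAStartLoop]
    simp
  | succ k ih =>
    intro n hn hk
    rw [pvAStartLoop]
    by_cases h : n < xs.length
    · simp only [h, dif_pos]
      rw [List.drop_eq_getElem_cons h, List.takeWhile_cons]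
      by_cases hb : PySem.Str.strip xs[n] == ""
      · have hrec := ih (n + 1) (by omega) (by omega)
        have hb' : pvBlank xs[n] = true := hb
        simp only [hb', if_true, List.length_cons, hrec]
        simp only [hb, if_true]
        omega
      · simp [hb, pvBlank]
    · have : n = xs.length := by omega
      subst this
      simp [h]

lemma pvAEnd_append (N : Nat) (ys zs : List String) (e : Int)
    (hN : (e + 1).toNat ≤ N) (he : e < ys.length) :
    pvAEndLoop (ys ++ zs) e = pvAEndLoop ys e := by
  induction N generalizing e with
  | zero =>
    have h0 : ¬ 0 ≤ e := by omega
    conv_lhs => rw [pvAEndLoop]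
    conv_rhs => rw [pvAEndLoop]
    simp [h0]
  | succ N ih =>
    conv_lhs => rw [pvAEndLoop]
    conv_rhs => rw [pvAEndLoop]
    by_cases h0 : 0 ≤ e
    · have hget : PySem.List.pyGetD (ys ++ zs) e "" = PySem.List.pyGetD ys e "" := by
        rw [PySem.List.pyGetD_eq_getElem (ys ++ zs) "" h0 (by simp; omega),
            PySem.List.pyGetD_eq_getElem ys "" h0 (by omega)]
        exact (List.getElem_append_left (by omega))
      rw [hget]
      by_cases hb : PySem.Str.strip (PySem.List.pyGetD ys e "") == ""
      · simp only [h0, hb, and_self, dif_pos, true_and]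
        exact ih (e - 1) (by omega) (by omega)
      · simp [h0, hb]
    · simp [h0]

lemma pvAEnd_eq (xs : List String) :
    pvAEndLoop xs ((xs.length : Int) - 1)
      = (xs.length : Int) - 1 - ((xs.reverse.takeWhile pvBlank).length : Int) := by
  induction xs using List.reverseRecOn with
  | nil =>
    rw [pvAEndLoop]; simp
  | append_singleton ys l ih =>
    rw [pvAEndLoop]
    have hlen : ((ys ++ [l]).length : Int) - 1 = (ys.length : Int) := by simp
    have hget : PySem.List.pyGetD (ys ++ [l]) ((ys ++ [l]).length - 1) "" = l := by
      rw [hlen, PySem.List.pyGetD_eq_getElem (ys ++ [l]) "" (by omega) (by simp)]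
      simp
    rw [hget]
    by_cases hb : PySem.Str.strip l == ""
    · have h0 : (0:Int) ≤ ((ys ++ [l]).length : Int) - 1 := by simp
      simp only [h0, hb, and_self, dif_pos, true_and]
      rw [hlen]
      rw [pvAEnd_append (((ys.length : Int) - 1) + 1).toNat ys [l] ((ys.length : Int) - 1) le_rfl (by omega)]
      rw [ih]
      have ht : (ys ++ [l]).reverse.takeWhile pvBlank = l :: ys.reverse.takeWhile pvBlank := by
        simp only [List.reverse_append, List.reverse_singleton, List.singleton_append,
          List.takeWhile_cons]
        have hb' : pvBlank l = true := hb
        simp [hb']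
      rw [ht]
      push_cast [List.length_cons]
      ring
    · simp only [hb, and_false, dif_neg, not_false_iff]
      rw [hlen]
      have : (ys ++ [l]).reverse.takeWhile pvBlank = [] := by
        simp only [List.reverse_append, List.reverse_singleton, List.singleton_append,
          List.takeWhile_cons]
        simp [pvBlank, hb]
      rw [this]
      simp

lemma pvIdx_cons (x : String) (xs : List String) (n : Int) :
    pvIdx (x :: xs) n = (if pvBlank x then [] else [n]) ++ pvIdx xs (n + 1) := by
  unfold pvIdx
  rw [PySem.List.enumerate_cons]
  by_cases hb : pvBlank x
  · have : (PySem.Str.strip x != "") = false := by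
      simpa [pvBlank] using hb
    simp [List.filter_cons, this, hb]
  · have : (PySem.Str.strip x != "") = true := by
      simpa [pvBlank] using hb
    simp [List.filter_cons, this, hb]

lemma pvIdx_head? (xs : List String) (n : Int) :
    (pvIdx xs n).head? = if xs.all pvBlank then none
      else some (n + ((xs.takeWhile pvBlank).length : Int)) := by
  induction xs generalizing n with
  | nil => simp [pvIdx]
  | cons x xs ih =>
    rw [pvIdx_cons]
    by_cases hb : pvBlank x
    · simp only [hb, if_true, List.nil_append, ih, List.all_cons, List.takeWhile_cons, hb]
      by_cases hall : xs.all pvBlank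
      · simp [hall]
      · simp only [hall, if_false, Bool.and_false]
        simp [hb]
        push_cast
        ring
    · have hb' : pvBlank x = false := by simpa using hb
      simp [hb', List.takeWhile_cons, List.all_cons]

lemma pvIdx_getLast? (xs : List String) (n : Int) :
    (pvIdx xs n).getLast? = if xs.all pvBlank then none
      else some (n + (xs.length : Int) - 1 - ((xs.reverse.takeWhile pvBlank).length : Int)) := by
  induction xs generalizing n with
  | nil => simp [pvIdx]
  | cons x xs ih =>
    rw [pvIdx_cons]
    by_cases hall : xs.all pvBlank
    · have hnil : pvIdx xs (n + 1) = [] := by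
        have := pvIdx_head? xs (n + 1)
        simp only [hall, if_true] at this
        exact List.head?_eq_none_iff.mp this
      rw [hnil, List.append_nil]
      have hrevall : ∀ l ∈ xs.reverse, pvBlank l := by
        intro l hl
        exact (List.all_eq_true.mp hall) l (by simpa using hl)
      have hrevtake : xs.reverse.takeWhile pvBlank = xs.reverse :=
        List.takeWhile_eq_self_iff.mpr hrevall
      by_cases hb : pvBlank x
      · simp only [hb, if_true]
        have : (x :: xs).all pvBlank = true := by simp [List.all_cons, hb, hall]
        simp [this]
      · have hb' : pvBlank x = false := by simpa using hb
        have hall' : (x :: xs).all pvBlank = false := by simp [List.all_cons, hb']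
        simp only [hb', if_false, hall']
        have htake : (x :: xs).reverse.takeWhile pvBlank = xs.reverse := by
          rw [List.reverse_cons, List.takeWhile_append]
          simp [hrevtake, hb']
        rw [htake]
        simp
        push_cast
        ring
    · have hall' : (x :: xs).all pvBlank = false := by
        simp [List.all_cons, Bool.and_eq_true]
        intro _; simpa using hall
      have hne : pvIdx xs (n + 1) ≠ [] := by
        have := pvIdx_head? xs (n + 1)
        simp only [hall, if_false] at this
        intro hcon
        rw [hcon] at this
        simp at this
      rw [List.getLast?_append_of_ne_nil _ hne, ih]
      simp only [hall, if_false, hall']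
      have htake : (x :: xs).reverse.takeWhile pvBlank = xs.reverse.takeWhile pvBlank := by
        rw [List.reverse_cons, List.takeWhile_append]
        have hne' : (xs.reverse.takeWhile pvBlank).length ≠ xs.length := by
          intro hlen
          have hself : xs.reverse.takeWhile pvBlank = xs.reverse :=
            List.IsPrefix.eq_of_length (List.takeWhile_prefix _) (by simp [hlen])
          have hmem := List.takeWhile_eq_self_iff.mp hself
          apply absurd hall
          simp only [not_not, List.all_eq_true]
          intro l hl
          exact hmem l (by simpa using hl)
        simp [hne']
      rw [htake]
      refine congrArg some ?_
      push_cast [List.length_cons]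
      ring

lemma pv_not_all_bound (xs : List String) (h : ¬ xs.all pvBlank = true) :
    (xs.takeWhile pvBlank).length + (xs.reverse.takeWhile pvBlank).length < xs.length := by
  have hs := (List.takeWhile_prefix (p := pvBlank) (l := xs)).length_le
  have hd : xs.dropWhile pvBlank ≠ [] := by
    intro hcon
    apply h
    simp only [List.all_eq_true]
    intro l hl
    by_contra hbl
    have : l ∈ xs.dropWhile pvBlank ∨ l ∈ xs.takeWhile pvBlank := by
      rcases List.mem_append.mp (by rw [List.takeWhile_append_dropWhile]; exact hl :
        l ∈ xs.takeWhile pvBlank ++ xs.dropWhile pvBlank) with h1 | h2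
      · exact Or.inr h1
      · exact Or.inl h2
    rcases this with h1 | h2
    · rw [hcon] at h1; simp at h1
    · exact hbl (List.mem_takeWhile_imp h2)
  have hy : pvBlank ((xs.dropWhile pvBlank).head hd) = false :=
    List.head_dropWhile_not pvBlank hd
  -- the reverse of xs ends the takeWhile no later than the (non-blank) head of dropWhile
  have hsplit : xs.reverse = (xs.dropWhile pvBlank).reverse ++ (xs.takeWhile pvBlank).reverse := by
    rw [← List.reverse_append, List.takeWhile_append_dropWhile]
  have hlen_drop : (xs.takeWhile pvBlank).length + (xs.dropWhile pvBlank).length = xs.length := by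
    conv_rhs => rw [← List.takeWhile_append_dropWhile (p := pvBlank) (l := xs)]
    rw [List.length_append]
  have hrev : ((xs.dropWhile pvBlank).reverse.takeWhile pvBlank).length
      < (xs.dropWhile pvBlank).length := by
    have hle := (List.takeWhile_prefix (p := pvBlank) (l := (xs.dropWhile pvBlank).reverse)).length_le
    rw [List.length_reverse] at hle
    rcases lt_or_eq_of_le hle with hlt | heq
    · exact hlt
    · exfalso
      have hself : (xs.dropWhile pvBlank).reverse.takeWhile pvBlank
          = (xs.dropWhile pvBlank).reverse := by
        apply List.IsPrefix.eq_of_length (List.takeWhile_prefix _)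
        simpa using heq
      have hall := List.takeWhile_eq_self_iff.mp hself
      have : pvBlank ((xs.dropWhile pvBlank).head hd) = true := by
        apply hall
        simp [List.head_mem]
      rw [hy] at this
      exact Bool.false_ne_true this
  have htw : (xs.reverse.takeWhile pvBlank).length
      ≤ ((xs.dropWhile pvBlank).reverse.takeWhile pvBlank).length := by
    rw [hsplit, List.takeWhile_append]
    split_ifs with hcond
    · exfalso
      have hself : (xs.dropWhile pvBlank).reverse.takeWhile pvBlank
          = (xs.dropWhile pvBlank).reverse :=
        List.IsPrefix.eq_of_length (List.takeWhile_prefix _) (by simpa using hcond)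
      have hall := List.takeWhile_eq_self_iff.mp hself
      have : pvBlank ((xs.dropWhile pvBlank).head hd) = true := by
        apply hall
        simp [List.head_mem]
      rw [hy] at this
      exact Bool.false_ne_true this
    · exact le_rfl
  omega

def pvACore (xs : List String) : String :=
  if ((pvAStartLoop xs 0 : Int) > pvAEndLoop xs ((xs.length : Int) - 1)) then ""
  else PySem.Str.join "\n" (PySem.List.slice xs (some ((pvAStartLoop xs 0 : Nat) : Int))
    (some (pvAEndLoop xs ((xs.length : Int) - 1) + 1)))

def pvBCore (xs : List String) : List Int → String
  | [] => ""
  | i :: rest => PySem.Str.join "\n" (PySem.List.slice xs (some i) (some ((i :: rest).getLast (by simp) + 1)))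

lemma pvA_eq (value : String) :
    strip_surrounding_blank_lines value = pvACore (PySem.Str.splitlines value) := rfl

lemma pvB_eq (value : String) :
    strip_surrounding_blank_lines_alt value
      = pvBCore (PySem.Str.splitlines value) (pvIdx (PySem.Str.splitlines value) 0) := rfl

lemma pv_core (xs : List String) : pvACore xs = pvBCore xs (pvIdx xs 0) := by
  have hstart := pvAStart_eq xs 0 (Nat.zero_le _)
  rw [List.drop_zero] at hstart
  have hend := pvAEnd_eq xs
  unfold pvACore
  by_cases hall : xs.all pvBlank = true
  · -- every line is blank: A's start passes its end, B collects no index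
    have htw : xs.takeWhile pvBlank = xs :=
      List.takeWhile_eq_self_iff.mpr (List.all_eq_true.mp hall)
    have htwr : xs.reverse.takeWhile pvBlank = xs.reverse :=
      List.takeWhile_eq_self_iff.mpr (by
        intro l hl
        exact (List.all_eq_true.mp hall) l (by simpa using hl))
    have hnil : pvIdx xs 0 = [] := by
      have := pvIdx_head? xs 0
      simp only [hall, if_true] at this
      exact List.head?_eq_none_iff.mp this
    have hcond : ((pvAStartLoop xs 0 : Int) > pvAEndLoop xs ((xs.length : Int) - 1)) := by
      rw [hstart, hend, htw, htwr]
      simp only [List.length_reverse]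
      omega
    rw [if_pos hcond, hnil]
    rfl
  · -- some line is non-blank: both return the slice between the outermost non-blank lines
    have hbound := pv_not_all_bound xs hall
    have hcond : ¬ ((pvAStartLoop xs 0 : Int) > pvAEndLoop xs ((xs.length : Int) - 1)) := by
      rw [hstart, hend]
      omega
    rw [if_neg hcond]
    have hhead := pvIdx_head? xs 0
    have hlast := pvIdx_getLast? xs 0
    rw [if_neg hall] at hhead
    rw [if_neg hall] at hlast
    obtain ⟨i, rest, hlist⟩ := List.exists_cons_of_ne_nil
      (by intro hcon; rw [hcon] at hhead; simp at hhead : pvIdx xs 0 ≠ [])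
    rw [hlist] at hhead hlast
    rw [List.head?_cons] at hhead
    replace hhead := Option.some.inj hhead
    rw [List.getLast?_eq_some_getLast (List.cons_ne_nil i rest)] at hlast
    replace hlast := Option.some.inj hlast
    rw [hlist]
    simp only [pvBCore]
    simp only [hlast]
    simp only [hhead, hstart, hend]
    norm_num

-- ===== VERDICT (by name: the statement is the Claim_ definition above) =====
theorem strip_surrounding_blank_lines_spec : Claim_equal_strip_surrounding_blank_lines := by
  intro value _
  unfold Spec_strip_surrounding_blank_lines
  rw [pvA_eq, pvB_eq, pv_core]
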